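-- pv_equiv track=rewrite | github.com/qweuio456/Algorithm-Practice | 프로그래머스/brute_force2.py | solution
-- ===== SOURCE A (Python) =====
-- def solution(answers):
--     result = []
--     person_1 = [1, 2, 3, 4, 5] # 1번 수포자의 패턴
--     person_2 = [2, 1, 2, 3, 2, 4, 2, 5] # 2번 수포자의 패턴
--     person_3 = [3, 3, 1, 1, 2, 2, 4, 4, 5, 5] # 3번 수포자의 패턴
--     count_person = [0, 0, 0] # 각 수포자의 점수
--
--     for index, answer in enumerate(answers): # 맞출 때마다 각 수포자에게 점수를 1점씩 추가
--         if answer == person_1[index % len(person_1)]: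
--             count_person[0] = count_person[0] + 1
--         if answer == person_2[index % len(person_2)]:
--             count_person[1] = count_person[1] + 1
--         if answer == person_3[index % len(person_3)]:
--             count_person[2] = count_person[2] + 1
--
--     for index, score in enumerate(count_person): # 가장 점수를 많이 받은 수포자의 인덱스를 출력
--         if score == max(count_person):
--             result.append(index + 1)
--
--     return result
-- ===== SOURCE B (Python) =====
-- def solution(answers):
--     # Histogram keyed by (position mod 40, answer): 40 = lcm(5, 8, 10), the
--     # period after which all three guessing patterns repeat simultaneously,
--     # so the histogram determines every score.
--     hist = {}
--     for i, a in enumerate(answers):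
--         k = (i % 40, a)
--         hist[k] = hist.get(k, 0) + 1
--     patterns = [[1, 2, 3, 4, 5],
--                 [2, 1, 2, 3, 2, 4, 2, 5],
--                 [3, 3, 1, 1, 2, 2, 4, 4, 5, 5]]
--     scores = [sum(hist.get((r, p[r % len(p)]), 0) for r in range(40))
--               for p in patterns]
--     best = max(scores)
--     return [i + 1 for i, s in enumerate(scores) if s == best]
-- ===== Notes on version B (the rewrite author's own statement) =====
-- stated objective: alternative
-- what changed: A compares every answer against all three cyclic patterns in one fused loop over the answers; B never compares answers to patterns while scanning: it builds a histogram keyed by (index mod 40, answer) - 40 being the lcm of the three pattern lengths, their joint period - and then reads each person's score off the histogram with 40 dictionary lookups per pattern, before the same max-selection.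
import Mathlib
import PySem

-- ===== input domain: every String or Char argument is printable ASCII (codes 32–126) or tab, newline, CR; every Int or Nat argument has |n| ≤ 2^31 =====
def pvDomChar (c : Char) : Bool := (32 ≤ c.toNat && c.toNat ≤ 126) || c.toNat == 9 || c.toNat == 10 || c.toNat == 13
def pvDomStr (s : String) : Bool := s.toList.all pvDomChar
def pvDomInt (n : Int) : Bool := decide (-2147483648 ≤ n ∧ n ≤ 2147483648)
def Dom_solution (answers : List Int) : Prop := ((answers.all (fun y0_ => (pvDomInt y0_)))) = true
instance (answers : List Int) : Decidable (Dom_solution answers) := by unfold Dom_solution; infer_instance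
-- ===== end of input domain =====

-- B replaces A's fused three-pattern comparison scan by a pattern-oblivious histogram keyed by
-- (position mod 40, answer) — 40 = lcm(5,8,10), the joint period of the three patterns — from which
-- each score is read off in 40 lookups (alternative algorithm, same asymptotic cost).

-- ===== PORT A =====
-- literal transliteration of A: one fused loop over enumerate(answers) updating the
-- triple of counters, then a second loop appending index+1 when score == max(count_person)
def solution (answers : List Int) : List Int :=
  let person1 : List Int := [1, 2, 3, 4, 5]
  let person2 : List Int := [2, 1, 2, 3, 2, 4, 2, 5]
  let person3 : List Int := [3, 3, 1, 1, 2, 2, 4, 4, 5, 5]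
  let counts :=
    (PySem.List.enumerate answers).foldl
      (fun (c : Int × Int × Int) ia =>
        (if ia.2 = PySem.List.pyGetD person1 (PySem.Int.mod ia.1 (person1.length : Int)) 0 then c.1 + 1 else c.1,
         if ia.2 = PySem.List.pyGetD person2 (PySem.Int.mod ia.1 (person2.length : Int)) 0 then c.2.1 + 1 else c.2.1,
         if ia.2 = PySem.List.pyGetD person3 (PySem.Int.mod ia.1 (person3.length : Int)) 0 then c.2.2 + 1 else c.2.2))
      (0, 0, 0)
  let countPerson : List Int := [counts.1, counts.2.1, counts.2.2]
  (PySem.List.enumerate countPerson).foldl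
    (fun (r : List Int) is =>
      if is.2 = (PySem.List.max? countPerson (fun y => y)).getD 0 then r ++ [is.1 + 1] else r)
    []

-- ===== PORT B =====
-- hist[k] = hist.get(k, 0) + 1 over k = (i % 40, a); then 40 lookups per pattern
def solution_alt (answers : List Int) : List Int :=
  let hist :=
    (PySem.List.enumerate answers).foldl
      (fun (d : PySem.Dict (Int × Int) Int) ia =>
        let k := (PySem.Int.mod ia.1 40, ia.2)
        d.insert k (d.getD k 0 + 1))
      PySem.Dict.empty
  let patterns : List (List Int) :=
    [[1, 2, 3, 4, 5], [2, 1, 2, 3, 2, 4, 2, 5], [3, 3, 1, 1, 2, 2, 4, 4, 5, 5]]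
  let scores := patterns.map (fun p =>
    (PySem.List.pyRange 0 40 1).foldl
      (fun (s : Int) r =>
        s + hist.getD (r, PySem.List.pyGetD p (PySem.Int.mod r (p.length : Int)) 0) 0)
      0)
  let best := (PySem.List.max? scores (fun y => y)).getD 0
  (PySem.List.enumerate scores).filterMap
    (fun is => if is.2 = best then some (is.1 + 1) else none)

-- ===== PRECONDITION & SPEC =====
def Spec_solution (answers : List Int) (out : List Int) : Prop := out = solution_alt answers
instance (answers : List Int) (out : List Int) : Decidable (Spec_solution answers out) := by unfold Spec_solution; infer_instance

-- ===== CLAIM (what is proved, stated in full; the proofs are below) =====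
def Claim_equal_solution : Prop := ∀ (answers : List Int), Dom_solution answers → Spec_solution answers (solution answers)

-- ===== LEMMAS AND PROOFS =====

-- the fused fold's triple equals the three independent counts, for any start index
theorem pvFold_eq_counts (p1 p2 p3 : List Int) (xs : List Int) :
    ∀ (n : Int) (c1 c2 c3 : Int),
      (PySem.List.enumerate xs n).foldl
        (fun (c : Int × Int × Int) ia =>
          (if ia.2 = PySem.List.pyGetD p1 (PySem.Int.mod ia.1 (p1.length : Int)) 0 then c.1 + 1 else c.1,
           if ia.2 = PySem.List.pyGetD p2 (PySem.Int.mod ia.1 (p2.length : Int)) 0 then c.2.1 + 1 else c.2.1,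
           if ia.2 = PySem.List.pyGetD p3 (PySem.Int.mod ia.1 (p3.length : Int)) 0 then c.2.2 + 1 else c.2.2))
        (c1, c2, c3)
      = (c1 + ((PySem.List.enumerate xs n).countP
                (fun ia => ia.2 == PySem.List.pyGetD p1 (PySem.Int.mod ia.1 (p1.length : Int)) 0) : Nat),
         c2 + ((PySem.List.enumerate xs n).countP
                (fun ia => ia.2 == PySem.List.pyGetD p2 (PySem.Int.mod ia.1 (p2.length : Int)) 0) : Nat),
         c3 + ((PySem.List.enumerate xs n).countP
                (fun ia => ia.2 == PySem.List.pyGetD p3 (PySem.Int.mod ia.1 (p3.length : Int)) 0) : Nat)) := by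
  induction xs with
  | nil => intro n c1 c2 c3; simp [PySem.List.enumerate_nil]
  | cons x xs ih =>
      intro n c1 c2 c3
      rw [PySem.List.enumerate_cons]
      simp only [List.foldl_cons, List.countP_cons, ih]
      refine Prod.ext ?_ (Prod.ext ?_ ?_) <;>
        · simp only [beq_iff_eq]
          split_ifs with h <;> push_cast <;> omega

-- summing the one-hot indicator over the 40 residues picks out the residue of m
theorem pvSum_indicator (m x : Int) (hm0 : 0 ≤ m) (hm : m < 40) (v : Int → Int) :
    ((PySem.List.pyRange 0 40 1).map
        (fun r => if ((m, x) : Int × Int) = (r, v r) then (1 : Int) else 0)).sum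
      = if x = v m then 1 else 0 := by
  rw [show PySem.List.pyRange 0 40 1 =
      [0,1,2,3,4,5,6,7,8,9,10,11,12,13,14,15,16,17,18,19,20,21,22,23,24,25,26,27,28,29,30,31,32,33,34,35,36,37,38,39] from rfl]
  interval_cases m <;> simp [Prod.ext_iff, eq_comm]

-- B's 40-lookup sum over the (residue, answer) histogram equals A's direct count for a
-- pattern whose length divides 40
theorem pvMod40_mod (L n : Int) (hdvd : L ∣ 40) (hpos : 0 < L) :
    PySem.Int.mod (PySem.Int.mod n 40) L = PySem.Int.mod n L := by
  rw [PySem.Int.mod_eq_emod_of_pos (b := 40) (by norm_num),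
      PySem.Int.mod_eq_emod_of_pos hpos, PySem.Int.mod_eq_emod_of_pos hpos]
  exact Int.emod_emod_of_dvd n hdvd

-- cast of a count-plus-indicator, with the indicator flipped to the orientation pvSum_indicator uses
theorem pvElem (c : Nat) (a b : Int × Int) :
    ((c + if a == b then 1 else 0 : Nat) : Int) = (c : Int) + (if a = b then (1 : Int) else 0) := by
  by_cases h : a = b <;> simp [h]

theorem pvCount_sum (p : List Int) (hdvd : ((p.length : Int)) ∣ 40) (hpos : 0 < ((p.length : Int))) :
    ∀ (xs : List Int) (n : Int),
      ((PySem.List.pyRange 0 40 1).map (fun r =>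
          ((((PySem.List.enumerate xs n).map (fun ia => (PySem.Int.mod ia.1 40, ia.2))).count
              (r, PySem.List.pyGetD p (PySem.Int.mod r (p.length : Int)) 0) : Nat) : Int))).sum
      = ((PySem.List.enumerate xs n).countP
          (fun ia => ia.2 == PySem.List.pyGetD p (PySem.Int.mod ia.1 (p.length : Int)) 0) : Nat) := by
  intro xs
  induction xs with
  | nil =>
      intro n
      simp [PySem.List.enumerate_nil]
  | cons x xs ih =>
      intro n
      rw [PySem.List.enumerate_cons]
      simp only [List.map_cons, List.countP_cons, List.count_cons, pvElem]
      rw [PySem.List.sum_map_add_int, ih,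
          pvSum_indicator (PySem.Int.mod n 40) x
            (PySem.Int.mod_nonneg n (by norm_num)) (PySem.Int.mod_lt n (by norm_num))
            (fun r => PySem.List.pyGetD p (PySem.Int.mod r (p.length : Int)) 0),
          pvMod40_mod _ n hdvd hpos]
      simp only [beq_iff_eq]
      split_ifs <;> push_cast <;> ring

-- A's second append-loop over a 3-element list equals B's filterMap selection
theorem pvSelect_eq (a b c : Int) :
    (PySem.List.enumerate [a, b, c]).foldl
      (fun (r : List Int) is =>
        if is.2 = (PySem.List.max? [a, b, c] (fun y => y)).getD 0 then r ++ [is.1 + 1] else r)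
      []
    = (PySem.List.enumerate [a, b, c]).filterMap
        (fun is => if is.2 = (PySem.List.max? [a, b, c] (fun y => y)).getD 0 then some (is.1 + 1) else none) := by
  simp [PySem.List.enumerate_cons, PySem.List.enumerate_nil, List.filterMap]
  split_ifs <;> rfl

theorem solution_eq_alt (answers : List Int) : solution answers = solution_alt answers := by
  simp only [solution, solution_alt]
  rw [pvFold_eq_counts]
  simp only [Int.zero_add]
  rw [← List.foldl_map (f := fun (ia : Int × Int) => (PySem.Int.mod ia.1 40, ia.2))
        (g := fun (d : PySem.Dict (Int × Int) Int) k => d.insert k (d.getD k 0 + 1)),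
      PySem.Dict.foldl_insert_getD_add_one_eq_counter]
  simp only [List.map_cons, List.map_nil, PySem.List.foldl_add, PySem.Dict.getD_counter, Int.zero_add]
  rw [pvCount_sum [1, 2, 3, 4, 5] (by decide) (by decide) answers 0,
      pvCount_sum [2, 1, 2, 3, 2, 4, 2, 5] (by decide) (by decide) answers 0,
      pvCount_sum [3, 3, 1, 1, 2, 2, 4, 4, 5, 5] (by decide) (by decide) answers 0]
  exact pvSelect_eq _ _ _

-- ===== VERDICT (by name: the statement is the Claim_ definition above) =====
theorem solution_spec : Claim_equal_solution := by
  intro answers _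
  exact solution_eq_alt answers
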